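-- pv_equiv track=rewrite | github.com/samba-chinta/test-code | 4.py | FindMinSubRectangle
-- ===== SOURCE A (Python) =====
-- def FindMinSubRectangle(mat):
--     rows = len(mat)
--     cols = len(mat[0])
--
--     temp = []
--     for i in range(rows):
--         temp1 = []
--         for j in range(cols):
--             if i == 0 or j == 0:
--                 temp1 += mat[i][j],
--             else:
--                 temp1 += 0,
--         temp += temp1,
--
--     for i in range(1, rows):
--         for j in range(1, cols):
--             if (mat[i][j] == 0):
--                 temp[i][j] = min(temp[i][j-1], temp[i-1][j],temp[i-1][j-1]) + 1
--             else:
--                 temp[i][j] = 0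
--
--     val = temp[0][0]
--     mini = 0
--     minj = 0
--     for i in range(rows):
--         for j in range(cols):
--             if (val < temp[i][j]):
--                 val = temp[i][j]
--                 mini = i
--                 minj = j
--
--     return [tuple((mini-val,minj)),tuple((mini-val,minj+val)),tuple((mini,minj)),tuple((mini,minj+val))]
-- ===== SOURCE B (Python) =====
-- def FindMinSubRectangle(mat):
--     # Top-down memoized recursion for the DP value of each cell (dict memo),
--     # plus Python's max over a row-major generator of (value, i, j) triples
--     # (max returns the FIRST maximal triple, i.e. A's strict-< tie-break).
--     rows, cols = len(mat), len(mat[0])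
--     memo = {}
--
--     def d(i, j):
--         if (i, j) not in memo:
--             if i == 0 or j == 0:
--                 memo[(i, j)] = mat[i][j]
--             elif mat[i][j] != 0:
--                 memo[(i, j)] = 0
--             else:
--                 memo[(i, j)] = min(d(i, j - 1), d(i - 1, j), d(i - 1, j - 1)) + 1
--         return memo[(i, j)]
--
--     val, bi, bj = max(((d(i, j), i, j) for i in range(rows) for j in range(cols)),
--                       key=lambda t: t[0])
--     return [(bi - val, bj), (bi - val, bj + val), (bi, bj), (bi, bj + val)]
-- ===== Notes on version B (the rewrite author's own statement) =====
-- stated objective: alternative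
-- what changed: Replaces A's bottom-up in-place 2D DP table plus a separate whole-table best-scan by a top-down memoized recursion (dict-cached recursive d(i,j)) and a single pass that takes Python's max over a row-major generator of (value,i,j) triples.
import Mathlib
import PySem

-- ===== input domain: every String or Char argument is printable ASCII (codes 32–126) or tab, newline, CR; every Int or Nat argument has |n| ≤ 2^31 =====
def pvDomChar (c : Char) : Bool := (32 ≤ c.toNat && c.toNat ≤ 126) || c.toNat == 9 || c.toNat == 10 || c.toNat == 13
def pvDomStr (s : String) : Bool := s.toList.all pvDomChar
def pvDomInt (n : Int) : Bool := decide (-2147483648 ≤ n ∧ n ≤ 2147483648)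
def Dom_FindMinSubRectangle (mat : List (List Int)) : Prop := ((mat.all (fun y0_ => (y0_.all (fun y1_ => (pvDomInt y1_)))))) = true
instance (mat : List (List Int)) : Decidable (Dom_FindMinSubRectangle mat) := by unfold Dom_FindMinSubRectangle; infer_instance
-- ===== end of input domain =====

-- B replaces A's bottom-up in-place DP table plus separate best-scan by a top-down
-- memoized recursion (dict memo) plus Python's max over a generator of (value,i,j)
-- triples (objective: alternative; same asymptotic cost).

-- ===== PORT A =====
-- indices produced by Python's range() are nonnegative and, inside Pre_, in range,
-- so Nat-indexed getD/set are exact transliterations of mat[i][j] / temp[i][j] = v here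
def pvGet2 (t : List (List Int)) (i j : Nat) : Int := (t.getD i []).getD j 0

def pvSet2 (t : List (List Int)) (i j : Nat) (v : Int) : List (List Int) :=
  t.set i ((t.getD i []).set j v)

-- body of A's DP loop: temp[i][j] = min(temp[i][j-1], temp[i-1][j], temp[i-1][j-1]) + 1 or 0
def pvDpStep (mat : List (List Int)) (i : Nat) (t : List (List Int)) (j : Nat) : List (List Int) :=
  if pvGet2 mat i j = 0 then
    pvSet2 t i j (min (min (pvGet2 t i (j - 1)) (pvGet2 t (i - 1) j)) (pvGet2 t (i - 1) (j - 1)) + 1)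
  else pvSet2 t i j 0

-- body of A's best-scan loop: if val < temp[i][j]: val, mini, minj = temp[i][j], i, j
def pvBestStep (t : List (List Int)) (i : Nat) (s : Int × Nat × Nat) (j : Nat) : Int × Nat × Nat :=
  if s.1 < pvGet2 t i j then (pvGet2 t i j, i, j) else s

def FindMinSubRectangle (mat : List (List Int)) : List (Int × Int) :=
  let rows := mat.length
  let cols := (mat.getD 0 []).length
  let temp0 := (List.range rows).map (fun i =>
    (List.range cols).map (fun j => if i = 0 ∨ j = 0 then pvGet2 mat i j else 0))
  let temp := (List.range' 1 (rows - 1)).foldl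
    (fun t i => (List.range' 1 (cols - 1)).foldl (pvDpStep mat i) t) temp0
  let s := (List.range rows).foldl
    (fun s i => (List.range cols).foldl (pvBestStep temp i) s) (pvGet2 temp 0 0, 0, 0)
  [(↑s.2.1 - s.1, ↑s.2.2), (↑s.2.1 - s.1, ↑s.2.2 + s.1), (↑s.2.1, ↑s.2.2), (↑s.2.1, ↑s.2.2 + s.1)]

-- ===== PORT B =====
-- B's memoized recursive DP value d(i, j); the dict memo is threaded through
def pvD (mat : List (List Int)) (i j : Nat) (memo : PySem.Dict (Nat × Nat) Int) :
    Int × PySem.Dict (Nat × Nat) Int :=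
  match memo.get? (i, j) with
  | some v => (v, memo)
  | none =>
    if h : i = 0 ∨ j = 0 then
      (pvGet2 mat i j, memo.insert (i, j) (pvGet2 mat i j))
    else if pvGet2 mat i j ≠ 0 then
      (0, memo.insert (i, j) 0)
    else
      let p1 := pvD mat i (j - 1) memo
      let p2 := pvD mat (i - 1) j p1.2
      let p3 := pvD mat (i - 1) (j - 1) p2.2
      let v := min (min p1.1 p2.1) p3.1 + 1
      (v, p3.2.insert (i, j) v)
termination_by i + j
decreasing_by all_goals omega

def FindMinSubRectangle_alt (mat : List (List Int)) : List (Int × Int) :=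
  let rows := mat.length
  let cols := (mat.getD 0 []).length
  -- the row-major generator of (d(i, j), i, j) triples, memo threaded through
  let tm := (List.range rows).foldl
    (fun (tm : List (Int × Nat × Nat) × PySem.Dict (Nat × Nat) Int) i =>
      (List.range cols).foldl
        (fun tm j =>
          let p := pvD mat i j tm.2
          (tm.1 ++ [(p.1, i, j)], p.2)) tm)
    ([], PySem.Dict.empty)
  -- max(..., key=lambda t: t[0]): first maximal triple; none only outside Pre_
  match PySem.List.max? tm.1 (fun t => t.1) with
  | some (v, i, j) => [(↑i - v, ↑j), (↑i - v, ↑j + v), (↑i, ↑j), (↑i, ↑j + v)]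
  | none => []

-- ===== PRECONDITION & SPEC =====
-- Pre_ excludes exactly the inputs on which Python A raises IndexError: an empty matrix,
-- an empty first row, or a later row shorter than the first row.
def Pre_FindMinSubRectangle (mat : List (List Int)) : Prop :=
  mat ≠ [] ∧ (mat.getD 0 []).length ≠ 0 ∧ ∀ r ∈ mat, (mat.getD 0 []).length ≤ r.length

instance (mat : List (List Int)) : Decidable (Pre_FindMinSubRectangle mat) := by
  unfold Pre_FindMinSubRectangle; infer_instance

def pvWitness_FindMinSubRectangle : List (List Int) := [[1, 0, 0], [0, 0, 0], [1, 0, 0]]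

def Spec_FindMinSubRectangle (mat : List (List Int)) (out : List (Int × Int)) : Prop := out = FindMinSubRectangle_alt mat
instance (mat : List (List Int)) (out : List (Int × Int)) : Decidable (Spec_FindMinSubRectangle mat out) := by unfold Spec_FindMinSubRectangle; infer_instance

-- ===== CLAIM (what is proved, stated in full; the proofs are below) =====
def Claim_equal_FindMinSubRectangle : Prop := ∀ (mat : List (List Int)), Dom_FindMinSubRectangle mat → Pre_FindMinSubRectangle mat → Spec_FindMinSubRectangle mat (FindMinSubRectangle mat)

-- ===== LEMMAS AND PROOFS =====

def pvCols (mat : List (List Int)) : Nat := (mat.getD 0 []).length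

-- the pure (memo-free) DP value: what both programs compute at cell (i, j)
def pvDspec (mat : List (List Int)) (i j : Nat) : Int :=
  if i = 0 ∨ j = 0 then pvGet2 mat i j
  else if pvGet2 mat i j ≠ 0 then 0
  else min (min (pvDspec mat i (j - 1)) (pvDspec mat (i - 1) j)) (pvDspec mat (i - 1) (j - 1)) + 1
termination_by i + j
decreasing_by all_goals omega

-- a memo is good when every stored value is the pure DP value of its key
def pvGood (mat : List (List Int)) (memo : PySem.Dict (Nat × Nat) Int) : Prop :=
  ∀ k v, memo.get? k = some v → v = pvDspec mat k.1 k.2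

theorem pvGood_insert (mat : List (List Int)) (memo : PySem.Dict (Nat × Nat) Int)
    (h : pvGood mat memo) (i j : Nat) (v : Int) (hv : v = pvDspec mat i j) :
    pvGood mat (memo.insert (i, j) v) := by
  intro k w hw
  rw [PySem.Dict.get?_insert] at hw
  split_ifs at hw with hk
  · cases hw; subst hk; exact hv
  · exact h k w hw

theorem pvD_correct (mat : List (List Int)) (i j : Nat) (memo : PySem.Dict (Nat × Nat) Int)
    (h : pvGood mat memo) :
    (pvD mat i j memo).1 = pvDspec mat i j ∧ pvGood mat (pvD mat i j memo).2 := by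
  rw [pvD]
  cases hm : memo.get? (i, j) with
  | some v =>
    exact ⟨h (i, j) v hm, h⟩
  | none =>
    by_cases h0 : i = 0 ∨ j = 0
    · have hd : pvDspec mat i j = pvGet2 mat i j := by rw [pvDspec, if_pos h0]
      rw [dif_pos h0]
      exact ⟨hd.symm, pvGood_insert mat memo h i j _ hd.symm⟩
    · rw [dif_neg h0]
      by_cases hz : pvGet2 mat i j ≠ 0
      · have hd : pvDspec mat i j = 0 := by
          conv_lhs => rw [pvDspec]
          rw [if_neg h0, if_pos hz]
        rw [if_pos hz]
        exact ⟨hd.symm, pvGood_insert mat memo h i j 0 hd.symm⟩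
      · rw [if_neg hz]
        have hd : pvDspec mat i j
            = min (min (pvDspec mat i (j - 1)) (pvDspec mat (i - 1) j)) (pvDspec mat (i - 1) (j - 1)) + 1 := by
          conv_lhs => rw [pvDspec]
          rw [if_neg h0, if_neg hz]
        have H1 := pvD_correct mat i (j - 1) memo h
        have H2 := pvD_correct mat (i - 1) j (pvD mat i (j - 1) memo).2 H1.2
        have H3 := pvD_correct mat (i - 1) (j - 1) (pvD mat (i - 1) j (pvD mat i (j - 1) memo).2).2 H2.2
        have hval : min (min (pvD mat i (j - 1) memo).1
              (pvD mat (i - 1) j (pvD mat i (j - 1) memo).2).1)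
              (pvD mat (i - 1) (j - 1) (pvD mat (i - 1) j (pvD mat i (j - 1) memo).2).2).1 + 1
            = pvDspec mat i j := by
          rw [H1.1, H2.1, H3.1, hd]
        exact ⟨hval, pvGood_insert mat _ H3.2 i j _ hval⟩
termination_by i + j
decreasing_by all_goals omega

-- the triples B's generator yields, in row-major order
def pvTriples (mat : List (List Int)) (rows cols : Nat) : List (Int × Nat × Nat) :=
  (List.range rows).flatMap (fun i => (List.range cols).map (fun j => (pvDspec mat i j, i, j)))

theorem pvInnerB (mat : List (List Int)) (i : Nat) :
    ∀ (js : List Nat) (tm0 : List (Int × Nat × Nat) × PySem.Dict (Nat × Nat) Int),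
    pvGood mat tm0.2 →
    (js.foldl (fun tm j => let p := pvD mat i j tm.2; (tm.1 ++ [(p.1, i, j)], p.2)) tm0).1
        = tm0.1 ++ js.map (fun j => (pvDspec mat i j, i, j))
    ∧ pvGood mat (js.foldl (fun tm j => let p := pvD mat i j tm.2; (tm.1 ++ [(p.1, i, j)], p.2)) tm0).2 := by
  intro js
  induction js with
  | nil => intro tm0 h; exact ⟨by simp, h⟩
  | cons j js ih =>
    intro tm0 h
    have hc := pvD_correct mat i j tm0.2 h
    rw [List.foldl_cons]
    have hrec := ih (tm0.1 ++ [((pvD mat i j tm0.2).1, i, j)], (pvD mat i j tm0.2).2) hc.2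
    refine ⟨?_, hrec.2⟩
    rw [hrec.1]
    simp [hc.1]

theorem pvOuterB (mat : List (List Int)) (cols : Nat) :
    ∀ (is : List Nat) (tm0 : List (Int × Nat × Nat) × PySem.Dict (Nat × Nat) Int),
    pvGood mat tm0.2 →
    (is.foldl (fun (tm : List (Int × Nat × Nat) × PySem.Dict (Nat × Nat) Int) i =>
        (List.range cols).foldl (fun tm j => let p := pvD mat i j tm.2; (tm.1 ++ [(p.1, i, j)], p.2)) tm)
        tm0).1
      = tm0.1 ++ is.flatMap (fun i => (List.range cols).map (fun j => (pvDspec mat i j, i, j))) := by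
  intro is
  induction is with
  | nil => intro tm0 h; simp
  | cons i is ih =>
    intro tm0 h
    have hin := pvInnerB mat i (List.range cols) tm0 h
    rw [List.foldl_cons]
    have hrec := ih _ hin.2
    rw [hrec, hin.1]
    simp

-- ===== A-side: the final contents of the DP table =====

-- the final contents of row i of A's table, built left to right
def pvRowStep (prev r : List Int) (c : List Int) (j : Nat) : List Int :=
  c ++ [if r.getD j 0 = 0 then
          min (min (c.getD (j - 1) 0) (prev.getD j 0)) (prev.getD (j - 1) 0) + 1
        else 0]

def pvBuildRow (cols : Nat) (prev r : List Int) : List Int :=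
  (List.range' 1 (cols - 1)).foldl (pvRowStep prev r) [r.getD 0 0]

def pvFinalRow (mat : List (List Int)) : Nat → List Int
  | 0 => (List.range (pvCols mat)).map (fun j => pvGet2 mat 0 j)
  | i + 1 => pvBuildRow (pvCols mat) (pvFinalRow mat i) (mat.getD (i + 1) [])

-- A's in-place update of row i, viewed on the row alone
def pvRowSet (prev r : List Int) (c : List Int) (j : Nat) : List Int :=
  if r.getD j 0 = 0 then
    c.set j (min (min (c.getD (j - 1) 0) (prev.getD j 0)) (prev.getD (j - 1) 0) + 1)
  else c.set j 0

theorem pv_set_append_len {α : Type} (L : List α) (x : α) (rest : List α) (v : α) :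
    (L ++ x :: rest).set L.length v = L ++ v :: rest := by
  induction L with
  | nil => rfl
  | cons a L ih => simp [ih]

theorem pv_len_rowfold (prev r : List Int) (js : List Nat) (c : List Int) :
    (js.foldl (pvRowStep prev r) c).length = c.length + js.length := by
  induction js generalizing c with
  | nil => rfl
  | cons j js ih => simp [List.foldl, ih, pvRowStep]; omega

theorem pv_inner_eq_row (mat : List (List Int)) (i : Nat) (hi : 1 ≤ i)
    (js : List Nat) (hjs : ∀ j ∈ js, 1 ≤ j) :
    ∀ t : List (List Int), i < t.length →
    js.foldl (pvDpStep mat i) t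
      = t.set i (js.foldl (pvRowSet (t.getD (i - 1) []) (mat.getD i [])) (t.getD i [])) := by
  induction js with
  | nil =>
    intro t ht
    simp only [List.foldl_nil, List.getD_eq_getElem?_getD, List.getElem?_eq_getElem ht,
      Option.getD_some, List.set_getElem_self]
  | cons j js ih =>
    intro t ht
    have hj : 1 ≤ j := hjs j (by simp)
    have hjs' : ∀ j ∈ js, 1 ≤ j := fun x hx => hjs x (by simp [hx])
    have hstep : pvDpStep mat i t j
        = t.set i (pvRowSet (t.getD (i - 1) []) (mat.getD i []) (t.getD i []) j) := by
      simp only [pvDpStep, pvRowSet, pvSet2, pvGet2]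
      split_ifs <;> rfl
    rw [List.foldl_cons, hstep, ih hjs']
    · have hne : i - 1 ≠ i := by omega
      have hgd_prev : ((t.set i (pvRowSet (t.getD (i - 1) []) (mat.getD i []) (t.getD i []) j)).getD (i - 1) [])
          = t.getD (i - 1) [] := by
        simp [List.getD_eq_getElem?_getD, List.getElem?_set_ne hne.symm]
      have hgd_self : ((t.set i (pvRowSet (t.getD (i - 1) []) (mat.getD i []) (t.getD i []) j)).getD i [])
          = pvRowSet (t.getD (i - 1) []) (mat.getD i []) (t.getD i []) j := by
        simp [List.getD_eq_getElem?_getD, List.getElem?_set_self ht]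
      rw [hgd_prev, hgd_self, List.set_set, List.foldl_cons]
    · simpa using ht

theorem pv_rowset_eq_append (prev r : List Int) :
    ∀ (m : Nat) (c0 : List Int), 1 + m ≤ c0.length → c0.getD 0 0 = r.getD 0 0 →
    (List.range' 1 m).foldl (pvRowSet prev r) c0
      = (List.range' 1 m).foldl (pvRowStep prev r) [r.getD 0 0] ++ c0.drop (1 + m) := by
  intro m
  induction m with
  | zero =>
    intro c0 hlen h0
    match c0, hlen with
    | a :: t, _ =>
      have h0' : a = r.getD 0 0 := by simpa using h0
      simp only [List.range'_zero, List.foldl_nil, List.cons_append, List.nil_append,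
        List.drop_succ_cons, List.drop_zero]
      rw [← h0']
  | succ m ih =>
    intro c0 hlen h0
    have hIH := ih c0 (by omega) h0
    rw [List.range'_concat, List.foldl_append, List.foldl_append, hIH]
    have hL : ((List.range' 1 m).foldl (pvRowStep prev r) [r.getD 0 0]).length = 1 + m := by
      rw [pv_len_rowfold]; simp
    set L := (List.range' 1 m).foldl (pvRowStep prev r) [r.getD 0 0] with hLdef
    have hlt : 1 + m < c0.length := by omega
    have hdrop : c0.drop (1 + m) = c0[1 + m] :: c0.drop (1 + m + 1) := List.drop_eq_getElem_cons hlt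
    simp only [List.foldl_cons, List.foldl_nil]
    rw [show 1 + (m + 1) = 1 + m + 1 from by omega, hdrop]
    have hm1 : 1 + m - 1 = m := by omega
    have hget : (L ++ c0[1 + m] :: c0.drop (1 + m + 1)).getD m 0 = L.getD m 0 :=
      List.getD_append _ _ _ _ (by omega)
    have hset : ∀ v : Int, (L ++ c0[1 + m] :: c0.drop (1 + m + 1)).set (1 + m) v
        = (L ++ [v]) ++ c0.drop (1 + m + 1) := by
      intro v
      generalize c0[1 + m] = x
      rw [← hL, pv_set_append_len, List.append_cons]
    unfold pvRowSet pvRowStep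
    simp only [one_mul]
    rw [hm1, hget]
    split_ifs with hcond
    · rw [hset]
    · rw [hset]

-- getD of map-over-range
theorem pv_getD_map_range {α : Type} (f : Nat → α) (d : α) (n i : Nat) (h : i < n) :
    ((List.range n).map f).getD i d = f i := by
  simp [List.getD_eq_getElem?_getD, h]

theorem pv_outer_inv (mat : List (List Int)) (hm : mat ≠ []) (hc : 1 ≤ pvCols mat) :
    ∀ k, k < mat.length →
    (List.range' 1 k).foldl
        (fun t i => (List.range' 1 (pvCols mat - 1)).foldl (pvDpStep mat i) t)
        ((List.range mat.length).map (fun i =>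
          (List.range (pvCols mat)).map (fun j => if i = 0 ∨ j = 0 then pvGet2 mat i j else 0)))
      = (List.range (k + 1)).map (pvFinalRow mat)
        ++ ((List.range mat.length).map (fun i =>
          (List.range (pvCols mat)).map (fun j => if i = 0 ∨ j = 0 then pvGet2 mat i j else 0))).drop (k + 1) := by
  have hrows : 1 ≤ mat.length := List.length_pos_iff.mpr hm
  set g : Nat → List Int := fun i =>
    (List.range (pvCols mat)).map (fun j => if i = 0 ∨ j = 0 then pvGet2 mat i j else 0) with hg
  set T0 : List (List Int) := (List.range mat.length).map g with hT0
  have hT0len : T0.length = mat.length := by simp [hT0]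
  have hbase : g 0 = pvFinalRow mat 0 := by
    simp [hg, pvFinalRow]
  intro k
  induction k with
  | zero =>
    intro _
    obtain ⟨rows', hr⟩ : ∃ r', mat.length = r' + 1 := ⟨mat.length - 1, by omega⟩
    simp only [List.range'_zero, List.foldl_nil, List.map_cons, List.map_nil,
      hT0, hr, List.range_eq_range', List.range'_succ]
    simp [hbase.symm]
  | succ k ih =>
    intro hk1
    have hk : k < mat.length := by omega
    rw [List.range'_concat, List.foldl_append, ih hk]
    set mapL := (List.range (k + 1)).map (pvFinalRow mat) with hmapL
    have hmapLlen : mapL.length = k + 1 := by simp [hmapL]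
    set t : List (List Int) := mapL ++ T0.drop (k + 1) with ht
    have htlen : t.length = mat.length := by
      simp [ht, hmapLlen, hT0len]; omega
    simp only [List.foldl_cons, List.foldl_nil, one_mul]
    rw [show 1 + k = k + 1 from by omega]
    rw [pv_inner_eq_row mat (k + 1) (by omega) _ (fun j hj => by
      rw [List.mem_range'_1] at hj; omega) t (by omega)]
    have hgd_prev : t.getD (k + 1 - 1) [] = pvFinalRow mat k := by
      rw [show k + 1 - 1 = k from by omega, ht]
      rw [List.getD_append _ _ _ _ (by omega), hmapL, pv_getD_map_range _ _ _ _ (by omega)]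
    have hdropT : T0.drop (k + 1) = T0[k + 1] :: T0.drop (k + 1 + 1) :=
      List.drop_eq_getElem_cons (by omega)
    have hT0get : T0[k + 1] = g (k + 1) := by
      simp [hT0, List.getElem_map, List.getElem_range]
    have hgd_self : t.getD (k + 1) [] = g (k + 1) := by
      rw [ht, hdropT, hT0get]
      rw [List.getD_eq_getElem?_getD, List.getElem?_append_right (by omega)]
      simp [hmapLlen]
    have hglen : (g (k + 1)).length = pvCols mat := by simp [hg]
    have hg0 : (g (k + 1)).getD 0 0 = (mat.getD (k + 1) []).getD 0 0 := by
      rw [hg, pv_getD_map_range _ _ _ _ (by omega)]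
      simp [pvGet2]
    have hrow := pv_rowset_eq_append (pvFinalRow mat k) (mat.getD (k + 1) [])
      (pvCols mat - 1) (g (k + 1)) (by omega) hg0
    have hdropg : (g (k + 1)).drop (1 + (pvCols mat - 1)) = [] := by
      rw [show 1 + (pvCols mat - 1) = (g (k + 1)).length from by omega]
      exact List.drop_length
    rw [hgd_prev, hgd_self, hrow, hdropg, List.append_nil]
    have hfin : (List.range' 1 (pvCols mat - 1)).foldl
        (pvRowStep (pvFinalRow mat k) (mat.getD (k + 1) []))
        [(mat.getD (k + 1) []).getD 0 0] = pvFinalRow mat (k + 1) := rfl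
    rw [hfin, ht, hdropT, hT0get]
    rw [← hmapLlen, pv_set_append_len, hmapLlen]
    simp [hmapL, List.range_succ]

-- ===== the final table holds exactly the pure DP values =====

theorem pvBuild_getD (mat : List (List Int)) (i : Nat) (prev : List Int)
    (hprev : ∀ j < pvCols mat, prev.getD j 0 = pvDspec mat i j) :
    ∀ m, m ≤ pvCols mat - 1 → ∀ j, j ≤ m →
    ((List.range' 1 m).foldl (pvRowStep prev (mat.getD (i + 1) []))
        [(mat.getD (i + 1) []).getD 0 0]).getD j 0 = pvDspec mat (i + 1) j := by
  intro m
  induction m with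
  | zero =>
    intro _ j hj
    have hj0 : j = 0 := by omega
    subst hj0
    have hd : pvDspec mat (i + 1) 0 = pvGet2 mat (i + 1) 0 := by
      rw [pvDspec, if_pos (Or.inr rfl)]
    simp [hd, pvGet2]
  | succ m ih =>
    intro hm j hj
    have hm' : m ≤ pvCols mat - 1 := by omega
    have hcols : m + 1 < pvCols mat := by omega
    rw [List.range'_concat, List.foldl_append]
    set c := (List.range' 1 m).foldl (pvRowStep prev (mat.getD (i + 1) []))
        [(mat.getD (i + 1) []).getD 0 0] with hcdef
    have hlen : c.length = 1 + m := by rw [hcdef, pv_len_rowfold]; simp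
    simp only [List.foldl_cons, List.foldl_nil, one_mul]
    rw [pvRowStep]
    by_cases hjm : j ≤ m
    · rw [List.getD_append _ _ _ _ (by omega)]
      exact ih hm' j hjm
    · have hj1 : j = m + 1 := by omega
      subst hj1
      rw [List.getD_eq_getElem?_getD, List.getElem?_append_right (by omega), hlen]
      simp only [show (1 : Nat) + m = m + 1 from by omega, Nat.sub_self,
        List.getElem?_cons_zero, Option.getD_some]
      have h1 : c.getD m 0 = pvDspec mat (i + 1) m := ih hm' m (by omega)
      have h2 : prev.getD (m + 1) 0 = pvDspec mat i (m + 1) := hprev (m + 1) hcols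
      have h3 : prev.getD m 0 = pvDspec mat i m := hprev m (by omega)
      have hg : (mat.getD (i + 1) []).getD (m + 1) 0 = pvGet2 mat (i + 1) (m + 1) := rfl
      simp only [Nat.add_sub_cancel]
      have hd : pvDspec mat (i + 1) (m + 1)
          = if pvGet2 mat (i + 1) (m + 1) ≠ 0 then 0
            else min (min (pvDspec mat (i + 1) m) (pvDspec mat i (m + 1))) (pvDspec mat i m) + 1 := by
        conv_lhs => rw [pvDspec]
        rw [if_neg (by omega)]
        simp only [Nat.add_sub_cancel]
      rw [h1, h2, h3, hg, hd]
      by_cases hz : pvGet2 mat (i + 1) (m + 1) = 0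
      · rw [if_pos hz, if_neg (by simpa using hz)]
      · rw [if_neg hz, if_pos hz]

theorem pvFinalRow_getD (mat : List (List Int)) (hc : 1 ≤ pvCols mat) :
    ∀ i, ∀ j < pvCols mat, (pvFinalRow mat i).getD j 0 = pvDspec mat i j := by
  intro i
  induction i with
  | zero =>
    intro j hj
    rw [pvFinalRow, pv_getD_map_range _ _ _ _ hj, pvDspec, if_pos (Or.inl rfl)]
  | succ i ih =>
    intro j hj
    rw [pvFinalRow, pvBuildRow]
    exact pvBuild_getD mat i (pvFinalRow mat i) ih (pvCols mat - 1) le_rfl j (by omega)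

-- ===== the scans =====

-- the common best-update step on triples
def pvG (s t : Int × Nat × Nat) : Int × Nat × Nat := if s.1 < t.1 then t else s

theorem pv_max_cons (x : Int × Nat × Nat) (tl : List (Int × Nat × Nat)) :
    PySem.List.max? (x :: tl) (fun t => t.1) = some (tl.foldl pvG x) := by
  induction tl generalizing x with
  | nil => rfl
  | cons y tl ih =>
    have step : PySem.List.max? (x :: y :: tl) (fun t => t.1)
        = PySem.List.max? ((if x.1 < y.1 then y else x) :: tl) (fun t => t.1) := by
      simp only [PySem.List.max?, List.foldl_cons]
      by_cases h : x.1 < y.1 <;> simp [h]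
    rw [step, ih]
    rfl

theorem FindMinSubRectangle_spec_aux (mat : List (List Int))
    (hm : mat ≠ []) (hc : 1 ≤ pvCols mat) :
    FindMinSubRectangle mat = FindMinSubRectangle_alt mat := by
  have hrows : 1 ≤ mat.length := List.length_pos_iff.mpr hm
  have hfold : (mat.getD 0 []).length = pvCols mat := rfl
  simp only [FindMinSubRectangle, FindMinSubRectangle_alt, hfold]
  -- A's final table is the list of pvFinalRow rows
  have hT0drop : ((List.range mat.length).map (fun i =>
      (List.range (pvCols mat)).map (fun j => if i = 0 ∨ j = 0 then pvGet2 mat i j else 0))).drop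
        mat.length = [] :=
    List.drop_eq_nil_of_le (by simp)
  have htemp : (List.range' 1 (mat.length - 1)).foldl
      (fun t i => (List.range' 1 (pvCols mat - 1)).foldl (pvDpStep mat i) t)
      ((List.range mat.length).map (fun i =>
        (List.range (pvCols mat)).map (fun j => if i = 0 ∨ j = 0 then pvGet2 mat i j else 0)))
      = (List.range mat.length).map (pvFinalRow mat) := by
    have h := pv_outer_inv mat hm hc (mat.length - 1) (by omega)
    rw [show mat.length - 1 + 1 = mat.length from by omega] at h
    rw [h, hT0drop, List.append_nil]
  rw [htemp]
  set T := (List.range mat.length).map (pvFinalRow mat) with hT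
  have hTget : ∀ i, i < mat.length → ∀ j, j < pvCols mat → pvGet2 T i j = pvDspec mat i j := by
    intro i hi j hj
    unfold pvGet2
    rw [hT, pv_getD_map_range _ _ _ _ hi]
    exact pvFinalRow_getD mat hc i j hj
  -- B's generated triples
  have hB := pvOuterB mat (pvCols mat) (List.range mat.length) ([], PySem.Dict.empty)
    (by intro k v hv; simp [PySem.Dict.get?_empty] at hv)
  rw [hB, List.nil_append]
  -- A's double scan is the fold of pvG over the same triples
  have hscan : ∀ (is : List Nat), (∀ i ∈ is, i < mat.length) → ∀ s0 : Int × Nat × Nat,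
      is.foldl (fun s i => (List.range (pvCols mat)).foldl (pvBestStep T i) s) s0
        = (is.flatMap (fun i => (List.range (pvCols mat)).map
            (fun j => (pvDspec mat i j, i, j)))).foldl pvG s0 := by
    intro is
    induction is with
    | nil => intro _ s0; rfl
    | cons i is ih =>
      intro hmem s0
      have hi : i < mat.length := hmem i (by simp)
      rw [List.foldl_cons, List.flatMap_cons, List.foldl_append,
        ← ih (fun x hx => hmem x (by simp [hx]))]
      congr 1
      rw [List.foldl_map]
      apply PySem.List.foldl_congr_mem
      intro s j hj
      have hj' : j < pvCols mat := List.mem_range.mp hj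
      simp only [pvBestStep, pvG, hTget i hi j hj']
  rw [hscan (List.range mat.length) (fun i hi => List.mem_range.mp hi)]
  rw [show pvGet2 T 0 0 = pvDspec mat 0 0 from hTget 0 (by omega) 0 (by omega)]
  -- peel the first triple (pvDspec 0 0, 0, 0) off the row-major list
  obtain ⟨r', hr⟩ : ∃ r', mat.length = r' + 1 := ⟨mat.length - 1, by omega⟩
  obtain ⟨c', hcc⟩ : ∃ c', pvCols mat = c' + 1 := ⟨pvCols mat - 1, by omega⟩
  have hrange : ∀ n : Nat, List.range (n + 1) = 0 :: List.range' 1 n := fun n => by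
    rw [List.range_eq_range', List.range'_succ]
  have hL : (List.range mat.length).flatMap (fun i =>
        (List.range (pvCols mat)).map (fun j => (pvDspec mat i j, i, j)))
      = (pvDspec mat 0 0, 0, 0) ::
        ((List.range' 1 c').map (fun j => (pvDspec mat 0 j, 0, j))
          ++ (List.range' 1 r').flatMap (fun i =>
            (List.range (c' + 1)).map (fun j => (pvDspec mat i j, i, j)))) := by
    rw [hr, hcc, hrange r', List.flatMap_cons, hrange c', List.map_cons, List.cons_append]
  rw [hL, List.foldl_cons,
    show pvG (pvDspec mat 0 0, 0, 0) (pvDspec mat 0 0, 0, 0) = (pvDspec mat 0 0, 0, 0) from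
      by simp [pvG]]
  rw [pv_max_cons]
-- ===== VERDICT (by name: the statement is the Claim_ definition above) =====
theorem FindMinSubRectangle_spec : Claim_equal_FindMinSubRectangle := by
  intro mat _ hpre
  obtain ⟨h1, h2, _⟩ := hpre
  exact FindMinSubRectangle_spec_aux mat h1 (Nat.one_le_iff_ne_zero.mpr h2)
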